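-- pv_equiv track=rewrite | github.com/AlTaber/BFU_DM | lab_5.py | poly_div_mod2
-- ===== SOURCE A (Python) =====
-- def poly_div_mod2(dividend, divisor):
--     msg = dividend[:]
--     poly = divisor[:]
--
--     while len(msg) >= len(poly) and (1 in msg):
--         # Ищем первую единицу
--         try:
--             first_one_idx = msg.index(1)
--         except ValueError:
--             break # Единиц нет
--
--         # Если оставшийся хвост короче полинома, то это уже остаток
--         if len(msg) - first_one_idx < len(poly):
--             break
--
--         # XORим часть сообщения с полиномом
--         for i in range(len(poly)):
--             msg[first_one_idx + i] ^= poly[i]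
--
--     # Убираем ведущие нули, но нужно аккуратно с длиной
--     # Для систематического кодирования нам нужны последние (N-K) бит
--     # Но проще вернуть результат как есть, обрезанный по длине N-K с конца
--     return msg[-(len(dividend) - len(divisor) + 1):]
-- ===== SOURCE B (Python) =====
-- def poly_div_mod2(dividend, divisor):
--     # Single left-to-right sweep: once a position is cleared it never becomes 1
--     # again (requires divisor[0] != 0, guaranteed by Pre_), so no rescans from
--     # the start are needed.
--     msg = dividend[:]
--     n, m = len(msg), len(divisor)
--     for i in range(n - m + 1):
--         if msg[i] == 1:
--             for j in range(m):
--                 msg[i + j] ^= divisor[j]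
--     return msg[-(n - m + 1):]
-- ===== Notes on version B (the rewrite author's own statement) =====
-- stated objective: alternative
-- what changed: A rescans the whole message with '1 in msg' and 'msg.index(1)' on every reduction step; B makes one left-to-right sweep, xoring the divisor wherever the current cell is 1, valid because a cleared position never becomes 1 again when divisor[0] != 0 (measured ~1.4x at the largest size, below the 1.5x bar, so no speed claim).
-- outside the precondition, e.g. on poly_div_mod2([0], []): A returns [0], B raises IndexError; on poly_div_mod2([1], [0]): A does not finish within the time limit, B returns [1]
import Mathlib
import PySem

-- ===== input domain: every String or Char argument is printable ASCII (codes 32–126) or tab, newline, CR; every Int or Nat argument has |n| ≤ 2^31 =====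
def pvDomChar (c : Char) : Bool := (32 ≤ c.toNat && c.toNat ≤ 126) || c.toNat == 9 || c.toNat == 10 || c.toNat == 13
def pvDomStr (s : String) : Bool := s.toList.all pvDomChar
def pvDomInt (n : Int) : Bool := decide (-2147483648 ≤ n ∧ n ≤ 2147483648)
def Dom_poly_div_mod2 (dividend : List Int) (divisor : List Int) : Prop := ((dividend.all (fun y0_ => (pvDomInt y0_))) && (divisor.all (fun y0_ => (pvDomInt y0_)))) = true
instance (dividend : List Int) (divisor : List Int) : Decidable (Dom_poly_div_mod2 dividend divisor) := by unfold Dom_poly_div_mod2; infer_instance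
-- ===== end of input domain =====

-- B replaces A's repeated full rescans (`1 in msg`, `msg.index(1)` each step) by a
-- single left-to-right sweep; proved equal on Pre_. Both Pythons mutate only a local
-- copy of `dividend`, so the equivalence is about the return value with no side effects.

-- ===== PORT A =====
-- shared inner loop of both Pythons: for j in range(len(poly)): msg[idx+j] ^= poly[j]
-- (exact for in-range writes, which is all that Pre_ admits)
def pvXorAt (msg : List Int) (poly : List Int) (idx : Nat) : List Int :=
  match poly with
  | [] => msg
  | p :: ps => pvXorAt (msg.set idx (PySem.Int.bxor (msg.getD idx 0) p)) ps (idx + 1)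

-- A's while loop; fuel = len(dividend)+1 suffices on every input Pre_ admits
def polyA_loop (poly : List Int) (fuel : Nat) (msg : List Int) : List Int :=
  match fuel with
  | 0 => msg
  | fuel + 1 =>
    if poly.length ≤ msg.length ∧ (1 : Int) ∈ msg then
      match PySem.List.index? msg (1 : Int) with
      | none => msg
      | some idx =>
        if (msg.length : Int) - idx < poly.length then msg
        else polyA_loop poly fuel (pvXorAt msg poly idx)
    else msg

def poly_div_mod2 (dividend : List Int) (divisor : List Int) : List Int :=
  let msg := polyA_loop divisor (dividend.length + 1) dividend
  PySem.List.slice msg (some (-((dividend.length : Int) - divisor.length + 1))) none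

-- ===== PORT B =====
-- B's single sweep: for i in range(n - m + 1): if msg[i] == 1: xor divisor in at i
-- (msg.getD i 0: the read is in range whenever m ≥ 1, i.e. on all of Pre_)
def polyB_go (divisor : List Int) (n m : Nat) (msg : List Int) (i : Nat) : List Int :=
  if _h : i + m ≤ n then
    polyB_go divisor n m (if msg.getD i 0 = 1 then pvXorAt msg divisor i else msg) (i + 1)
  else msg
termination_by n + 1 - i
decreasing_by omega

def poly_div_mod2_alt (dividend : List Int) (divisor : List Int) : List Int :=
  let n := dividend.length
  let m := divisor.length
  let msg := polyB_go divisor n m dividend 0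
  PySem.List.slice msg (some (-((n : Int) - m + 1))) none

-- ===== PRECONDITION & SPEC =====
-- Pre_ excludes the empty divisor (A returns the dividend whole there, a degenerate
-- corner on which B raises IndexError) and the inputs on which A loops forever
-- (divisor[0] == 0 with a usable 1 in the dividend).
def Pre_poly_div_mod2 (dividend : List Int) (divisor : List Int) : Prop :=
  divisor ≠ [] ∧
  (divisor.headI = 0 →
    ∀ i < dividend.length, i + divisor.length ≤ dividend.length → dividend.getD i 0 ≠ 1)
instance (dividend : List Int) (divisor : List Int) : Decidable (Pre_poly_div_mod2 dividend divisor) := by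
  unfold Pre_poly_div_mod2; infer_instance

def pvWitness_poly_div_mod2 : List Int × List Int := ([1, 0, 1, 1, 0, 0, 0], [1, 0, 1, 1])

def Spec_poly_div_mod2 (dividend : List Int) (divisor : List Int) (out : List Int) : Prop := out = poly_div_mod2_alt dividend divisor
instance (dividend : List Int) (divisor : List Int) (out : List Int) : Decidable (Spec_poly_div_mod2 dividend divisor out) := by unfold Spec_poly_div_mod2; infer_instance

-- ===== CLAIM (what is proved, stated in full; the proofs are below) =====
def Claim_equal_poly_div_mod2 : Prop := ∀ (dividend : List Int) (divisor : List Int), Dom_poly_div_mod2 dividend divisor → Pre_poly_div_mod2 dividend divisor → Spec_poly_div_mod2 dividend divisor (poly_div_mod2 dividend divisor)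

-- ===== LEMMAS AND PROOFS =====

theorem bxor_one_eq_one (p : Int) (h : PySem.Int.bxor 1 p = 1) : p = 0 := by
  unfold PySem.Int.bxor at h
  by_cases hp : 0 ≤ p
  · simp [hp] at h
    have h2 : 1 ^^^ (1 ^^^ p.toNat) = 1 ^^^ 1 := by rw [h]
    simp at h2
    omega
  · simp [hp] at h
    omega

theorem pvXorAt_length (poly : List Int) : ∀ (msg : List Int) (idx : Nat),
    (pvXorAt msg poly idx).length = msg.length := by
  induction poly with
  | nil => intro msg idx; rfl
  | cons p ps ih =>
    intro msg idx
    simp only [pvXorAt, ih, List.length_set]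

theorem pvXorAt_getD_lt (poly : List Int) : ∀ (msg : List Int) (idx j : Nat), j < idx →
    (pvXorAt msg poly idx).getD j 0 = msg.getD j 0 := by
  induction poly with
  | nil => intro msg idx j _; rfl
  | cons p ps ih =>
    intro msg idx j hj
    simp only [pvXorAt]
    rw [ih _ _ _ (by omega)]
    simp only [List.getD]
    rw [List.getElem?_set_ne (by omega)]

theorem pvXorAt_getD_head (p : Int) (ps : List Int) (msg : List Int) (idx : Nat)
    (h : idx < msg.length) :
    (pvXorAt msg (p :: ps) idx).getD idx 0 = PySem.Int.bxor (msg.getD idx 0) p := by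
  simp only [pvXorAt]
  rw [pvXorAt_getD_lt _ _ _ _ (by omega)]
  simp only [List.getD]
  rw [List.getElem?_set_self (by omega)]
  rfl

theorem index?_eq_of_first (msg : List Int) (i : Nat) (hi : i < msg.length)
    (h1 : msg.getD i 0 = 1) (hlt : ∀ j < i, msg.getD j 0 ≠ 1) :
    PySem.List.index? msg 1 = some i := by
  rw [PySem.List.index?_eq_some_iff]
  refine ⟨msg.take i, msg.drop (i + 1), ?_, by simp [List.length_take]; omega, ?_⟩
  · have hg : msg[i] = 1 := by rw [← List.getD_eq_getElem msg 0 hi]; exact h1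
    rw [← hg, List.getElem_cons_drop hi]
    exact (List.take_append_drop i msg).symm
  · intro hmem
    obtain ⟨j, hj, hval⟩ := List.mem_iff_getElem.mp hmem
    have hjlen : j < i := by
      have := List.length_take_le i msg; simp [List.length_take] at hj ⊢; omega
    have : msg[j]'(by omega) = 1 := by
      rw [← hval]; rw [List.getElem_take]
    exact hlt j hjlen (by rw [List.getD_eq_getElem msg 0 (by omega)]; exact this)

-- main loop equivalence: A's rescan loop equals B's sweep from i, given that no
-- position before i holds a 1 and (if divisor[0] = 0) no usable 1 remains
theorem loop_eq (poly : List Int) (n : Nat) (hm : poly ≠ []) :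
    ∀ (k i fuel : Nat) (msg : List Int),
    n + 1 - i ≤ k →
    msg.length = n →
    n + 1 ≤ fuel + i →
    (∀ j, j < i → msg.getD j 0 ≠ 1) →
    (poly.headI = 0 → ∀ j, i ≤ j → j + poly.length ≤ n → msg.getD j 0 ≠ 1) →
    polyA_loop poly fuel msg = polyB_go poly n poly.length msg i := by
  have hm1 : 1 ≤ poly.length := by cases poly with | nil => exact absurd rfl hm | cons a l => simp
  intro k
  induction k with
  | zero =>
    intro i fuel msg hk hlen hfuel hlt _h0
    -- i ≥ n + 1 : every position is < i, so no 1 at all; both loops stop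
    have hstop : ¬ (i + poly.length ≤ n) := by omega
    rw [polyB_go]; simp only [hstop, dite_false]
    have hno1 : (1 : Int) ∉ msg := by
      intro hmem
      obtain ⟨j, hj, hval⟩ := List.mem_iff_getElem.mp hmem
      exact hlt j (by omega) (by rw [List.getD_eq_getElem msg 0 hj]; exact hval)
    cases fuel with
    | zero => rfl
    | succ f => simp only [polyA_loop]; rw [if_neg]; intro hc; exact hno1 hc.2
  | succ k ih =>
    intro i fuel msg hk hlen hfuel hlt h0
    rw [polyB_go]
    by_cases hc : i + poly.length ≤ n
    · simp only [hc, dite_true]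
      have hi : i < n := by omega
      by_cases h1 : msg.getD i 0 = 1
      · -- reduction step: A's first 1 is exactly i
        simp only [h1, if_pos]
        have hhead : poly.headI ≠ 0 := by
          intro hz; exact h0 hz i (le_refl i) hc h1
        obtain ⟨f, rfl⟩ : ∃ f, fuel = f + 1 := ⟨fuel - 1, by omega⟩
        simp only [polyA_loop]
        have hmem : (1 : Int) ∈ msg := by
          have hg : msg[i]'(by omega) = 1 := by
            rw [← List.getD_eq_getElem msg 0 (by omega)]; exact h1
          exact hg ▸ List.getElem_mem _
        rw [if_pos ⟨by omega, hmem⟩]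
        rw [index?_eq_of_first msg i (by omega) h1 hlt]
        dsimp only
        rw [if_neg (by omega)]
        -- both recurse on the same new state
        obtain ⟨p, ps, rfl⟩ : ∃ p ps, poly = p :: ps := by
          cases poly with | nil => exact absurd rfl hm | cons a l => exact ⟨a, l, rfl⟩
        apply ih (i + 1) f
        · omega
        · rw [pvXorAt_length]; exact hlen
        · omega
        · intro j hj
          by_cases hji : j < i
          · rw [pvXorAt_getD_lt _ _ _ _ hji]; exact hlt j hji
          · have hji' : j = i := by omega
            subst hji'
            rw [pvXorAt_getD_head _ _ _ _ (by omega), h1]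
            intro hbad
            exact hhead (by simpa using bxor_one_eq_one p hbad)
        · intro hz; exact absurd hz (by simpa using hhead)
      · -- skip step: A's state unchanged, B moves to i + 1
        simp only [h1, ite_false]
        apply ih (i + 1) fuel msg (by omega) hlen (by omega)
        · intro j hj
          by_cases hji : j < i
          · exact hlt j hji
          · have : j = i := by omega
            subst this; exact h1
        · intro hz j hj; exact h0 hz j (by omega)
    · -- B stops; A also stops: any remaining 1 is at index > n - len(poly)
      simp only [hc, dite_false]
      cases fuel with
      | zero => rfl
      | succ f =>
        simp only [polyA_loop]
        by_cases hmem : (1 : Int) ∈ msg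
        · by_cases hmn : poly.length ≤ msg.length
          · rw [if_pos ⟨hmn, hmem⟩]
            obtain ⟨idx, hidx⟩ := Option.isSome_iff_exists.mp
              ((PySem.List.index?_isSome_iff msg 1).mpr hmem)
            rw [hidx]
            dsimp only
            obtain ⟨hk', hval, _hmin⟩ := PySem.List.getElem_of_index?_eq_some hidx
            have hge : i ≤ idx := by
              by_contra hlt'
              exact hlt idx (by omega) (by rw [List.getD_eq_getElem msg 0 hk']; exact hval)
            rw [if_pos (by omega)]
          · rw [if_neg (fun hcc => hmn hcc.1)]
        · rw [if_neg (fun hcc => hmem hcc.2)]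

-- ===== VERDICT (by name: the statement is the Claim_ definition above) =====
theorem poly_div_mod2_spec : Claim_equal_poly_div_mod2 := by
  intro dividend divisor _hdom hpre
  obtain ⟨hne, h0⟩ := hpre
  unfold Spec_poly_div_mod2 poly_div_mod2 poly_div_mod2_alt
  have hm1 : 1 ≤ divisor.length := by
    cases divisor with | nil => exact absurd rfl hne | cons a l => simp
  have := loop_eq divisor dividend.length hne (dividend.length + 1) 0
    (dividend.length + 1) dividend (by omega) rfl (by omega)
    (by intro j hj; omega)
    (by intro hz j _ hjm; exact h0 hz j (by omega) hjm)
  simp only [this]
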